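-- pv_equiv track=rewrite | github.com/JukaleManmath/Leetcode-Solutions | 0977-distinct-subsequences-ii/0977-distinct-subsequences-ii.py | distinctSubseqII
-- ===== SOURCE A (Python) =====
-- def distinctSubseqII(s: str) -> int:
--     n = len(s)
--     dp = [1]
--     last = {}
--     mod = 10**9 + 7
--     for i , x in enumerate(s):
--         dp.append(dp[-1] * 2)
--
--         if x in last:
--             dp[-1] = dp[-1] - dp[last[x]]
--
--         last[x] = i
--
--     return (dp[-1] - 1) % mod
-- ===== SOURCE B (Python) =====
-- def distinctSubseqII(s: str) -> int:
--     ends = {}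
--     for c in s:
--         ends[c] = sum(ends.values()) + 1
--     return sum(ends.values()) % (10**9 + 7)
-- ===== Notes on version B (the rewrite author's own statement) =====
-- stated objective: simpler
-- what changed: Replaces A's full dp array plus char-to-last-index dict and the doubling/subtraction recurrence with a single dict mapping each character to the count of distinct subsequences ending in it, recomputed as sum(values)+1 per step and summed at the end.
import Mathlib
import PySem

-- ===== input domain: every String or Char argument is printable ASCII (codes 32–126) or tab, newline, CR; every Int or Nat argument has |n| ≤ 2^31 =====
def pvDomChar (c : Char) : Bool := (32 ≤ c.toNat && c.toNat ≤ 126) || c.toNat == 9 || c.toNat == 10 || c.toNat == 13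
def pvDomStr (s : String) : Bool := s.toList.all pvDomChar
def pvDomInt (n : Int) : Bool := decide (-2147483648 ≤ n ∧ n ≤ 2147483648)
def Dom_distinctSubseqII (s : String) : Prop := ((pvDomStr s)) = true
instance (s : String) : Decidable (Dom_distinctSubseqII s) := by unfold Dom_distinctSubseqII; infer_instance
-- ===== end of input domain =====

-- B replaces A's full dp array + last-index dict with a single dict of per-ending-character
-- counts summed each step (objective: simpler; same exact value, mod applied at the end as in A).

-- ===== PORT A =====
-- loop body of A: dp.append(dp[-1]*2); if x in last: dp[-1] -= dp[last[x]]; last[x] = i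
def pvStepA (st : List Int × PySem.Dict Char Int) (p : Int × Char) :
    List Int × PySem.Dict Char Int :=
  let dp := st.1 ++ [PySem.List.pyGetD st.1 (-1) 0 * 2]
  let dp := if st.2.contains p.2 then
      dp.dropLast ++ [PySem.List.pyGetD dp (-1) 0 - PySem.List.pyGetD dp (st.2.getD p.2 0) 0]
    else dp
  (dp, st.2.insert p.2 p.1)

def distinctSubseqII (s : String) : Int :=
  let st := (PySem.List.enumerate s.toList 0).foldl pvStepA ([1], PySem.Dict.empty)
  PySem.Int.mod (PySem.List.pyGetD st.1 (-1) 0 - 1) (10 ^ 9 + 7)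

-- ===== PORT B =====
-- loop body of B: ends[c] = sum(ends.values()) + 1
def pvStepB (ends : PySem.Dict Char Int) (c : Char) : PySem.Dict Char Int :=
  ends.insert c (ends.values.sum + 1)

def distinctSubseqII_alt (s : String) : Int :=
  let ends := s.toList.foldl pvStepB PySem.Dict.empty
  PySem.Int.mod ends.values.sum (10 ^ 9 + 7)

-- ===== PRECONDITION & SPEC =====
def Spec_distinctSubseqII (s : String) (out : Int) : Prop := out = distinctSubseqII_alt s
instance (s : String) (out : Int) : Decidable (Spec_distinctSubseqII s out) := by unfold Spec_distinctSubseqII; infer_instance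

-- ===== CLAIM (what is proved, stated in full; the proofs are below) =====
def Claim_equal_distinctSubseqII : Prop := ∀ (s : String), Dom_distinctSubseqII s → Spec_distinctSubseqII s (distinctSubseqII s)

-- ===== LEMMAS AND PROOFS =====

-- xs[-1] with default is the last element
theorem pvGet_neg_one (l : List Int) : PySem.List.pyGetD l (-1) 0 = l.getLast?.getD 0 := by
  simp only [PySem.List.pyGetD, PySem.List.pyGet?, PySem.List.pyIdx?]
  rcases l with _ | ⟨a, t⟩
  · simp
  · simp [List.getLast?_eq_getElem?]

-- sum of second components after replacing the unique pair keyed k by (k, v)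
theorem pvSumReplace (l : List (Char × Int)) (k : Char) (v w : Int)
    (hnd : (l.map Prod.fst).Nodup) (hm : (k, w) ∈ l) :
    ((l.map (fun p => if p.1 == k then (k, v) else p)).map Prod.snd).sum
      = (l.map Prod.snd).sum - w + v := by
  induction l with
  | nil => cases hm
  | cons a t ih =>
    simp only [List.map_cons, List.nodup_cons, List.mem_map] at hnd
    cases hm with
    | head =>
      have ht : ∀ p ∈ t, ¬ (p.1 == k) = true := by
        intro p hp hbeq
        exact hnd.1 ⟨p, hp, by simpa using hbeq⟩
      simp only [List.map_cons, List.sum_cons]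
      rw [if_pos (by simp), List.map_congr_left (fun p hp => if_neg (ht p hp)), List.map_id']
      simp only []
      ring
    | tail _ hm' =>
      have hak : ¬ (a.1 == k) = true := by
        intro hbeq
        exact hnd.1 ⟨(k, w), hm', by simpa using (eq_of_beq hbeq).symm⟩
      simp only [List.map_cons, List.sum_cons, if_neg hak]
      rw [ih hnd.2 hm']
      ring

-- sum of the values of d.insert k v
theorem pvSumInsert (d : PySem.Dict Char Int) (hnd : d.keys.Nodup) (k : Char) (v : Int) :
    (d.insert k v).values.sum = d.values.sum - d.getD k 0 + v := by
  by_cases h : d.contains k = true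
  · obtain ⟨w, hw⟩ : ∃ w, d.get? k = some w := by
      have := PySem.Dict.contains_eq_isSome_get? d k
      rw [h] at this
      exact Option.isSome_iff_exists.mp this.symm
    have hmem : (k, w) ∈ d.items := PySem.Dict.mem_items_of_get?_eq_some d hw
    have hgd : d.getD k 0 = w := PySem.Dict.getD_of_get?_eq_some d 0 hw
    rw [hgd]
    have hit := PySem.Dict.items_insert_of_contains d v h
    simp only [PySem.Dict.values, hit]
    exact pvSumReplace d.items k v w hnd hmem
  · have hit := PySem.Dict.items_insert_of_not_contains d v (by simpa using h)
    have hgd : d.getD k 0 = 0 := PySem.Dict.getD_of_not_contains d 0 (by simpa using h)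
    simp [PySem.Dict.values, hit, hgd]

-- loop invariant tying A's (dp, last) to B's ends after i characters
def pvInv (dp : List Int) (last ends : PySem.Dict Char Int) (i : Nat) : Prop :=
  dp.length = i + 1 ∧
  dp.getLast?.getD 0 = ends.values.sum + 1 ∧
  ends.keys.Nodup ∧
  (∀ c, last.contains c = ends.contains c) ∧
  (∀ c j, last.get? c = some j →
     ∃ jn : Nat, j = (jn : Int) ∧ jn < i ∧ dp.getD jn 0 = ends.getD c 0)

theorem pvStep_inv (dp : List Int) (last ends : PySem.Dict Char Int) (i : Nat) (x : Char)
    (h : pvInv dp last ends i) :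
    pvInv (pvStepA (dp, last) ((i : Int), x)).1 (pvStepA (dp, last) ((i : Int), x)).2
      (pvStepB ends x) (i + 1) := by
  obtain ⟨h1, h2, h3, h4, h5⟩ := h
  have e1 : PySem.List.pyGetD dp (-1) 0 = ends.values.sum + 1 := by rw [pvGet_neg_one, h2]
  have hdpi : dp.getD i 0 = ends.values.sum + 1 := by
    rw [List.getD_eq_getElem?_getD, ← h2, List.getLast?_eq_getElem?, h1,
      Nat.add_sub_cancel]
  by_cases hc : last.contains x = true
  · -- seen character: A subtracts dp[last[x]], B overwrites ends[x]
    have hce : ends.contains x = true := by rw [← h4]; exact hc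
    obtain ⟨j0, hj0⟩ : ∃ j0, last.get? x = some j0 := by
      have := PySem.Dict.contains_eq_isSome_get? last x
      rw [hc] at this
      exact Option.isSome_iff_exists.mp this.symm
    obtain ⟨jn, hjeq, hjlt, hjval⟩ := h5 x j0 hj0
    have hgd : last.getD x 0 = (jn : Int) := by
      rw [PySem.Dict.getD_of_get?_eq_some last 0 hj0, hjeq]
    have e2 : PySem.List.pyGetD (dp ++ [(ends.values.sum + 1) * 2]) (-1) 0
        = (ends.values.sum + 1) * 2 := by
      rw [pvGet_neg_one, List.getLast?_concat]; rfl
    have e3 : PySem.List.pyGetD (dp ++ [(ends.values.sum + 1) * 2]) (last.getD x 0) 0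
        = ends.getD x 0 := by
      rw [hgd, PySem.List.pyGetD_natCast, List.getD_append _ _ _ jn (by omega), hjval]
    have hA : pvStepA (dp, last) ((i : Int), x)
        = (dp ++ [(ends.values.sum + 1) * 2 - ends.getD x 0], last.insert x (i : Int)) := by
      simp only [pvStepA, e1, hc, if_true, e2, e3, List.dropLast_concat]
    have hsum := pvSumInsert ends h3 x (ends.values.sum + 1)
    rw [hA]
    refine ⟨by simp [h1], ?_, PySem.Dict.nodup_keys_insert ends x _ h3, ?_, ?_⟩
    · rw [List.getLast?_concat, Option.getD_some, pvStepB, hsum]; ring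
    · intro c
      rw [pvStepB, PySem.Dict.contains_insert, PySem.Dict.contains_insert, h4]
    · intro c j hj
      by_cases hcx : c = x
      · subst hcx
        rw [PySem.Dict.get?_insert] at hj
        simp only [if_true, Option.some.injEq] at hj
        refine ⟨i, hj.symm, Nat.lt_succ_self i, ?_⟩
        rw [List.getD_append _ _ _ i (by omega), hdpi, pvStepB,
          PySem.Dict.getD_insert_self]
      · rw [PySem.Dict.get?_insert_of_ne last _ hcx] at hj
        obtain ⟨jn', he, hlt, hval⟩ := h5 c j hj
        refine ⟨jn', he, by omega, ?_⟩
        rw [List.getD_append _ _ _ jn' (by omega), pvStepB,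
          PySem.Dict.getD_insert_of_ne ends _ 0 hcx, hval]
  · -- fresh character: A just doubles, B adds a new key
    have hcb : last.contains x = false := by simpa using hc
    have hce : ends.contains x = false := by rw [← h4]; exact hcb
    have hA : pvStepA (dp, last) ((i : Int), x)
        = (dp ++ [(ends.values.sum + 1) * 2], last.insert x (i : Int)) := by
      simp only [pvStepA, e1, hcb, Bool.false_eq_true, if_false]
    have hsum := pvSumInsert ends h3 x (ends.values.sum + 1)
    rw [PySem.Dict.getD_of_not_contains ends 0 hce] at hsum
    rw [hA]
    refine ⟨by simp [h1], ?_, PySem.Dict.nodup_keys_insert ends x _ h3, ?_, ?_⟩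
    · rw [List.getLast?_concat, Option.getD_some, pvStepB, hsum]; ring
    · intro c
      rw [pvStepB, PySem.Dict.contains_insert, PySem.Dict.contains_insert, h4]
    · intro c j hj
      by_cases hcx : c = x
      · subst hcx
        rw [PySem.Dict.get?_insert] at hj
        simp only [if_true, Option.some.injEq] at hj
        refine ⟨i, hj.symm, Nat.lt_succ_self i, ?_⟩
        rw [List.getD_append _ _ _ i (by omega), hdpi, pvStepB,
          PySem.Dict.getD_insert_self]
      · rw [PySem.Dict.get?_insert_of_ne last _ hcx] at hj
        obtain ⟨jn', he, hlt, hval⟩ := h5 c j hj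
        refine ⟨jn', he, by omega, ?_⟩
        rw [List.getD_append _ _ _ jn' (by omega), pvStepB,
          PySem.Dict.getD_insert_of_ne ends _ 0 hcx, hval]

theorem pvFold_inv (l : List Char) (i : Nat) (dp : List Int) (last ends : PySem.Dict Char Int)
    (h : pvInv dp last ends i) :
    pvInv (((PySem.List.enumerate l (i : Int)).foldl pvStepA (dp, last)).1)
      (((PySem.List.enumerate l (i : Int)).foldl pvStepA (dp, last)).2)
      (l.foldl pvStepB ends) (i + l.length) := by
  induction l generalizing i dp last ends with
  | nil => simpa [PySem.List.enumerate_nil] using h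
  | cons x t ih =>
    rw [PySem.List.enumerate_cons]
    have hstep := pvStep_inv dp last ends i x h
    have := ih (i + 1) (pvStepA (dp, last) ((i : Int), x)).1
      (pvStepA (dp, last) ((i : Int), x)).2 (pvStepB ends x) hstep
    simp only [List.foldl_cons, List.length_cons]
    have hcast : (i : Int) + 1 = ((i + 1 : Nat) : Int) := by push_cast; ring
    rw [hcast, show i + (t.length + 1) = i + 1 + t.length from by omega]
    exact this

-- ===== VERDICT (by name: the statement is the Claim_ definition above) =====
theorem distinctSubseqII_spec : Claim_equal_distinctSubseqII := by
  intro s _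
  unfold Spec_distinctSubseqII distinctSubseqII distinctSubseqII_alt
  have h0 : pvInv [1] PySem.Dict.empty PySem.Dict.empty 0 := by
    refine ⟨rfl, by decide, by decide, ?_, ?_⟩
    · intro c; rfl
    · intro c j hj; rw [PySem.Dict.get?_empty] at hj; cases hj
  have := pvFold_inv s.toList 0 [1] PySem.Dict.empty PySem.Dict.empty h0
  simp only [Nat.cast_zero, Nat.zero_add] at this
  obtain ⟨-, h2, -, -, -⟩ := this
  dsimp only
  rw [pvGet_neg_one, h2]
  congr 1
  ring
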